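-- pv_equiv track=rewrite | github.com/SOVLOOKUP/AppliedCryptography | des/mySha.py | PadMessage_09
-- ===== SOURCE A (Python) =====
-- def PadMessage_09(string,m_num,pos):
-- 	"数据填充函数"
-- 	ascii=[]
-- 	hexInfo=[]
-- 	hexNum=hex(string.__len__()*8)[2:]
-- 	while hexNum.__len__()<16:
-- 		hexNum="0"+hexNum
-- 	for i in range(0,string.__len__()):
-- 		ascii.append(hex(ord(string[i])).split("0x")[1])
--
-- 	ascii.append("80")
-- 	for i in range(ascii.__len__(),64*m_num-8):
-- 		ascii.append("00")
-- 	for i in range(0,ascii.__len__(),4):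
-- 		hexInfo.append(ascii[i]+ascii[i+1]+ascii[i+2]+ascii[i+3])
-- 	hexInfo.append(hexNum[0:8])
-- 	hexInfo.append(hexNum[8:16])
-- 	return hexInfo[pos*16:(pos+1)*16]
-- ===== SOURCE B (Python) =====
-- def PadMessage_09(string, m_num, pos):
--     n = len(string)
--     total = max(n + 1, 64 * m_num - 8)   # bytes in the padded message body
--     words = total // 4
--     length_field = format(n * 8, "016x")
--
--     def byte(k):
--         if k < n:
--             return format(ord(string[k]), "x")
--         return "80" if k == n else "00"
--
--     def word(j):
--         if j < words:
--             return byte(4 * j) + byte(4 * j + 1) + byte(4 * j + 2) + byte(4 * j + 3)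
--         return length_field[0:8] if j == words else length_field[8:16]
--
--     return [word(j) for j in range(words + 2)[pos * 16:(pos + 1) * 16]]
-- ===== Notes on version B (the rewrite author's own statement) =====
-- stated objective: faster
-- what changed: Instead of materialising the whole padded message (per-char hex list, O(m_num) '00' fill, grouping pass) and slicing it, B derives each of the at-most-16 requested words directly from an index->word function over a sliced index range; Pre_ excludes only the inputs where A raises IndexError (padded byte count not a multiple of 4).
import Mathlib
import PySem

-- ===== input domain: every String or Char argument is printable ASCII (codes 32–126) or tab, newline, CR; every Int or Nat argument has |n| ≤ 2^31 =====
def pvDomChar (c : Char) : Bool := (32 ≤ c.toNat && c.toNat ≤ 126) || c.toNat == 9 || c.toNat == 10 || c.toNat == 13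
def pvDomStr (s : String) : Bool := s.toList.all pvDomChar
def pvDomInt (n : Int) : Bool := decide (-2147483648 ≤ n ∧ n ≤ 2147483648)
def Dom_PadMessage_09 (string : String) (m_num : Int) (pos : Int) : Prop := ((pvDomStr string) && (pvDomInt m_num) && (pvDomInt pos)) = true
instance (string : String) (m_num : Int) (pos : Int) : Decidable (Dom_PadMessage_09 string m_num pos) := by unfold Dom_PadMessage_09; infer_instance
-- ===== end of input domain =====

-- B computes only the requested window of words directly from an index->word function instead of
-- building the whole padded message; the proven claim is return-value equivalence on Pre_.

-- ===== PORT A =====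
-- Python's hex(n)[2:] for n ≥ 0 (lowercase digits, no leading zeros except hex(0)="0"): Nat.toDigits 16 is exactly this
def pvHexChars (n : Nat) : List Char := Nat.toDigits 16 n

-- A's while loop: while len(hexNum) < 16: hexNum = "0" + hexNum
def pvPadLoop (l : List Char) : List Char :=
  if l.length < 16 then pvPadLoop ('0' :: l) else l
  termination_by 16 - l.length
  decreasing_by simp; omega

def PadMessage_09 (string : String) (m_num : Int) (pos : Int) : List String :=
  let chars := string.toList
  let hexNum := pvPadLoop (pvHexChars (chars.length * 8))
  let ascii1 : Array (List Char) := (PySem.List.pyRange 0 chars.length 1).foldl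
      (fun acc i => acc.push (pvHexChars (PySem.List.pyGetD chars i ' ').toNat)) #[]
  let ascii2 := ascii1.push ['8','0']
  let ascii3 := (PySem.List.pyRange ascii2.size (64 * m_num - 8) 1).foldl
      (fun acc _ => acc.push ['0','0']) ascii2
  let hexInfo : Array (List Char) := (PySem.List.pyRange 0 ascii3.size 4).foldl
      (fun acc i => acc.push (ascii3.getD i.toNat [] ++ ascii3.getD (i+1).toNat []
          ++ ascii3.getD (i+2).toNat [] ++ ascii3.getD (i+3).toNat [])) #[]
  let hexInfo2 := (hexInfo.push (PySem.List.slice hexNum (some 0) (some 8))).push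
      (PySem.List.slice hexNum (some 8) (some 16))
  (PySem.List.slice hexInfo2.toList (some (pos * 16)) (some ((pos + 1) * 16))).map String.mk

-- ===== PORT B =====
-- format(n, "016x"): zero-fill the hex digits to width 16
def pvZfill (l : List Char) : List Char :=
  if 16 ≤ l.length then l else List.replicate (16 - l.length) '0' ++ l

def pvByte (chars : List Char) (k : Nat) : List Char :=
  if h : k < chars.length then pvHexChars (chars[k]).toNat
  else if k = chars.length then ['8','0'] else ['0','0']

def PadMessage_09_alt (string : String) (m_num : Int) (pos : Int) : List String :=
  let chars := string.toList
  let n := chars.length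
  let total : Int := max ((n : Int) + 1) (64 * m_num - 8)
  let words : Int := PySem.Int.floordiv total 4
  let lengthField := pvZfill (pvHexChars (n * 8))
  let word : Int → List Char := fun j =>
    if j < words then
      pvByte chars (4 * j).toNat ++ pvByte chars (4 * j + 1).toNat
        ++ pvByte chars (4 * j + 2).toNat ++ pvByte chars (4 * j + 3).toNat
    else if j = words then PySem.List.slice lengthField (some 0) (some 8)
    else PySem.List.slice lengthField (some 8) (some 16)
  (PySem.List.slice (PySem.List.pyRange 0 (words + 2) 1)
      (some (pos * 16)) (some ((pos + 1) * 16))).map (fun j => String.mk (word j))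

-- ===== PRECONDITION & SPEC =====
-- A raises IndexError exactly when the padded byte count max(n+1, 64*m_num-8) is not a multiple of 4
-- (the grouping loop then reads past the end); Pre_ excludes exactly those inputs.
def Pre_PadMessage_09 (string : String) (m_num : Int) (pos : Int) : Prop :=
  (max ((string.toList.length : Int) + 1) (64 * m_num - 8)) % 4 = 0

instance (string : String) (m_num : Int) (pos : Int) : Decidable (Pre_PadMessage_09 string m_num pos) := by
  unfold Pre_PadMessage_09; infer_instance

def pvWitness_PadMessage_09 : String × Int × Int := ("abc", 1, 0)

def Spec_PadMessage_09 (string : String) (m_num : Int) (pos : Int) (out : List String) : Prop :=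
  out = PadMessage_09_alt string m_num pos
instance (string : String) (m_num : Int) (pos : Int) (out : List String) : Decidable (Spec_PadMessage_09 string m_num pos out) := by
  unfold Spec_PadMessage_09; infer_instance

-- ===== CLAIM (what is proved, stated in full; the proofs are below) =====
def Claim_equal_PadMessage_09 : Prop := ∀ (string : String) (m_num : Int) (pos : Int), Dom_PadMessage_09 string m_num pos → Pre_PadMessage_09 string m_num pos → Spec_PadMessage_09 string m_num pos (PadMessage_09 string m_num pos)

-- ===== LEMMAS AND PROOFS =====

-- proof-only helper: the padded layout as one indexed item function
def pvItem (chars : List Char) (Gn : Nat) (j : Nat) : List Char :=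
  if j < Gn then pvByte chars (4*j) ++ pvByte chars (4*j+1) ++ pvByte chars (4*j+2) ++ pvByte chars (4*j+3)
  else if j = Gn then (pvZfill (pvHexChars (chars.length * 8))).take 8
  else ((pvZfill (pvHexChars (chars.length * 8))).drop 8).take 8

-- A's while loop is left zero-fill to width 16
theorem pvPadLoop_eq (l : List Char) : pvPadLoop l = pvZfill l := by
  fun_induction pvPadLoop l with
  | case1 l hlt ih =>
    rw [ih]
    unfold pvZfill
    simp only [List.length_cons]
    split_ifs with h1 h2 <;> try omega
    · have h15 : l.length = 15 := by omega
      simp [h15]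
    · have : 16 - l.length = (16 - (l.length + 1)) + 1 := by omega
      rw [this, List.replicate_succ']
      simp
  | case2 l hge => simp [pvZfill]; omega

theorem pv_mem_slice {α : Type} {x : α} (xs : List α) (a b : Option Int)
    (h : x ∈ PySem.List.slice xs a b) : x ∈ xs := by
  unfold PySem.List.slice at h
  exact List.mem_of_mem_drop (List.mem_of_mem_take h)

theorem pv_map_slice {α β : Type} (g : α → β) (xs : List α) (a b : Option Int) :
    (PySem.List.slice xs a b).map g = PySem.List.slice (xs.map g) a b := by
  unfold PySem.List.slice
  simp [List.map_take, List.map_drop]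

-- Python list append/indexing is Array push/getD; bridge lemmas to List form
theorem pv_foldl_push_toList {α β : Type} (f : β → α) (l : List β) (acc : Array α) :
    (l.foldl (fun acc x => acc.push (f x)) acc).toList = acc.toList ++ l.map f := by
  induction l generalizing acc with
  | nil => simp
  | cons x xs ih => rw [List.foldl_cons, ih, Array.toList_push]; simp
theorem pv_array_getD {α : Type} (a : Array α) (i : Nat) (d : α) :
    a.getD i d = a.toList.getD i d := by
  rw [List.getD, Array.getElem?_toList]
  unfold Array.getD
  split_ifs with h
  · rw [Array.getElem?_eq_getElem h]
    rfl
  · rw [Array.getElem?_eq_none (by omega)]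
    rfl

-- A builds exactly the indexed table, then slices it
theorem pv_A_eq (string : String) (m_num : Int) (pos : Int)
    (hpre : Pre_PadMessage_09 string m_num pos) :
    PadMessage_09 string m_num pos
      = (PySem.List.slice ((List.range ((string.toList.length + 1
            + ((64 * m_num - 8) - ((string.toList.length : Int) + 1)).toNat) / 4 + 2)).map
              (pvItem string.toList ((string.toList.length + 1
                + ((64 * m_num - 8) - ((string.toList.length : Int) + 1)).toNat) / 4)))
          (some (pos * 16)) (some ((pos + 1) * 16))).map String.mk := by
  unfold Pre_PadMessage_09 at hpre
  simp only [PadMessage_09]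
  set chars := string.toList with hch
  set n := chars.length with hn
  set cnt : Nat := ((64 * m_num - 8) - ((n : Int) + 1)).toNat with hcnt
  set Lnat : Nat := n + 1 + cnt with hLnat
  set Gn : Nat := Lnat / 4 with hGn
  have hL4 : Lnat % 4 = 0 := by omega
  have h1 : ((PySem.List.pyRange 0 (n : Int) 1).foldl
      (fun acc i => acc.push (pvHexChars (PySem.List.pyGetD chars i ' ').toNat)) #[]).toList
      = (List.range n).map (fun k => pvByte chars k) := by
    rw [pv_foldl_push_toList, PySem.List.pyRange_one]
    simp only [Array.toList_empty, List.nil_append, List.map_map, Int.sub_zero, Int.toNat_natCast]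
    apply List.map_congr_left
    intro k hk
    have hk' : k < n := List.mem_range.mp hk
    simp only [Function.comp_apply, zero_add, PySem.List.pyGetD_natCast]
    rw [List.getD_eq_getElem chars ' ' hk']
    unfold pvByte
    rw [dif_pos hk']
  have hsz2 : (((PySem.List.pyRange 0 (n : Int) 1).foldl
      (fun acc i => acc.push (pvHexChars (PySem.List.pyGetD chars i ' ').toNat)) #[]).push ['8','0']).size = n + 1 := by
    rw [Array.size_push, ← Array.length_toList, h1]
    simp
  rw [hsz2]
  have hcnt' : ((64 * m_num - 8) - ((n + 1 : Nat) : Int)).toNat = cnt := by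
    rw [hcnt]; push_cast; ring_nf
  have h3' : ((PySem.List.pyRange ((n + 1 : Nat) : Int) (64 * m_num - 8) 1).foldl
      (fun acc _ => acc.push ['0','0'])
      (((PySem.List.pyRange 0 (n : Int) 1).foldl
        (fun acc i => acc.push (pvHexChars (PySem.List.pyGetD chars i ' ').toNat)) #[]).push ['8','0'])).toList
      = (List.range Lnat).map (pvByte chars) := by
    rw [pv_foldl_push_toList (fun _ => (['0','0'] : List Char)), Array.toList_push, h1]
    rw [List.map_const', PySem.List.length_pyRange_one, hcnt']
    rw [hLnat, List.range_add, List.range_succ]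
    simp only [List.map_append, List.map_map, List.append_assoc]
    congr 1
    congr 1
    · simp only [List.map_cons, List.map_nil]
      unfold pvByte
      rw [dif_neg (by omega), if_pos (by omega)]
    · have hpv : ∀ k, pvByte chars (n + 1 + k) = ['0','0'] := by
        intro k
        unfold pvByte
        rw [dif_neg (by omega), if_neg (by omega)]
      calc List.replicate cnt (['0','0'] : List Char)
          = (List.range cnt).map (fun k => pvByte chars (n + 1 + k)) := by
            rw [List.map_congr_left (fun k _ => hpv k)]
            simp [List.map_const']
        _ = (List.range cnt).map (pvByte chars ∘ (n + 1 + ·)) := rfl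
  have hsz3 : ((PySem.List.pyRange ((n + 1 : Nat) : Int) (64 * m_num - 8) 1).foldl
      (fun acc _ => acc.push ['0','0'])
      (((PySem.List.pyRange 0 (n : Int) 1).foldl
        (fun acc i => acc.push (pvHexChars (PySem.List.pyGetD chars i ' ').toNat)) #[]).push ['8','0'])).size = Lnat := by
    rw [← Array.length_toList, h3']
    simp
  rw [hsz3]
  simp only [pv_array_getD, h3']
  rw [Array.toList_push, Array.toList_push]
  rw [pv_foldl_push_toList (fun (i : Int) =>
      ((List.range Lnat).map (pvByte chars)).getD i.toNat []
      ++ ((List.range Lnat).map (pvByte chars)).getD (i+1).toNat []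
      ++ ((List.range Lnat).map (pvByte chars)).getD (i+2).toNat []
      ++ ((List.range Lnat).map (pvByte chars)).getD (i+3).toNat [])]
  have hrange4 : PySem.List.pyRange 0 (Lnat : Int) 4
      = (List.range Gn).map (fun (k : Nat) => (0 : Int) + 4 * (k : Int)) := by
    have hcount : (if (0:Int) < (Lnat : Int) then (((Lnat : Int) - 0 + 4 - 1)/4).toNat else 0) = Gn := by
      rw [if_pos (by omega : (0:Int) < (Lnat : Int))]
      omega
    rw [PySem.List.pyRange_of_pos 0 (Lnat : Int) (by norm_num), hcount]
  rw [hrange4, List.map_map]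
  have h4 : (List.range Gn).map ((fun (i : Int) =>
      ((List.range Lnat).map (pvByte chars)).getD i.toNat []
      ++ ((List.range Lnat).map (pvByte chars)).getD (i+1).toNat []
      ++ ((List.range Lnat).map (pvByte chars)).getD (i+2).toNat []
      ++ ((List.range Lnat).map (pvByte chars)).getD (i+3).toNat []) ∘ (fun (k : Nat) => (0 : Int) + 4 * (k : Int)))
      = (List.range Gn).map (fun g => pvByte chars (4*g) ++ pvByte chars (4*g+1) ++ pvByte chars (4*g+2) ++ pvByte chars (4*g+3)) := by
    apply List.map_congr_left
    intro g hg
    have hg' : g < Gn := List.mem_range.mp hg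
    have e0 : ((0:Int) + 4*(g:Int)).toNat = 4*g := by omega
    have e1 : ((0:Int) + 4*(g:Int) + 1).toNat = 4*g + 1 := by omega
    have e2 : ((0:Int) + 4*(g:Int) + 2).toNat = 4*g + 2 := by omega
    have e3 : ((0:Int) + 4*(g:Int) + 3).toNat = 4*g + 3 := by omega
    simp only [Function.comp_apply, e0, e1, e2, e3]
    rw [PySem.List.getD_map_range _ _ _ _ (by omega), PySem.List.getD_map_range _ _ _ _ (by omega),
        PySem.List.getD_map_range _ _ _ _ (by omega), PySem.List.getD_map_range _ _ _ _ (by omega)]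
  rw [Array.toList_empty, List.nil_append, h4]
  have hz : pvPadLoop (pvHexChars (chars.length * 8)) = pvZfill (pvHexChars (chars.length * 8)) :=
    pvPadLoop_eq _
  rw [hz]
  have hs1 : PySem.List.slice (pvZfill (pvHexChars (chars.length * 8))) (some 0) (some 8)
      = (pvZfill (pvHexChars (chars.length * 8))).take 8 := by
    rw [PySem.List.slice_toNat _ (by norm_num) (by norm_num)]
    simp
  have hs2 : PySem.List.slice (pvZfill (pvHexChars (chars.length * 8))) (some 8) (some 16)
      = ((pvZfill (pvHexChars (chars.length * 8))).drop 8).take 8 := by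
    rw [PySem.List.slice_toNat _ (by norm_num) (by norm_num)]
    simp
  rw [hs1, hs2]
  have hfull : (List.range Gn).map (fun g => pvByte chars (4*g) ++ pvByte chars (4*g+1) ++ pvByte chars (4*g+2) ++ pvByte chars (4*g+3))
        ++ [(pvZfill (pvHexChars (chars.length * 8))).take 8]
        ++ [((pvZfill (pvHexChars (chars.length * 8))).drop 8).take 8]
      = (List.range (Gn + 2)).map (pvItem chars Gn) := by
    rw [List.append_assoc, List.range_add, List.map_append]
    congr 1
    · apply List.map_congr_left
      intro j hj
      have hj' : j < Gn := List.mem_range.mp hj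
      unfold pvItem
      rw [if_pos hj']
    · have hr2 : (List.range 2).map (Gn + ·) = [Gn, Gn + 1] := rfl
      rw [hr2]
      simp only [List.map_cons, List.map_nil]
      unfold pvItem
      rw [if_neg (by omega), if_pos rfl, if_neg (by omega), if_neg (by omega)]
      rfl
  rw [hfull]

-- B slices the index range and maps word over it: the same slice of the same table
theorem pv_B_eq (string : String) (m_num : Int) (pos : Int)
    (hpre : Pre_PadMessage_09 string m_num pos) :
    PadMessage_09_alt string m_num pos
      = (PySem.List.slice ((List.range ((string.toList.length + 1
            + ((64 * m_num - 8) - ((string.toList.length : Int) + 1)).toNat) / 4 + 2)).map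
              (pvItem string.toList ((string.toList.length + 1
                + ((64 * m_num - 8) - ((string.toList.length : Int) + 1)).toNat) / 4)))
          (some (pos * 16)) (some ((pos + 1) * 16))).map String.mk := by
  unfold Pre_PadMessage_09 at hpre
  set chars := string.toList with hch
  set n := chars.length with hn
  set cnt : Nat := ((64 * m_num - 8) - ((n : Int) + 1)).toNat with hcnt
  set Lnat : Nat := n + 1 + cnt with hLnat
  set Gn : Nat := Lnat / 4 with hGn
  have hL4 : Lnat % 4 = 0 := by omega
  have hmax : max ((n : Int) + 1) (64 * m_num - 8) = (Lnat : Int) := by omega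
  have hG : PySem.Int.floordiv (Lnat : Int) 4 = (Gn : Int) := by
    unfold PySem.Int.floordiv
    rw [Int.fdiv_eq_ediv]
    simp
    omega
  unfold PadMessage_09_alt
  simp only [← hch, ← hn, hmax, hG]
  have hT : (Gn : Int) + 2 = ((Gn + 2 : Nat) : Int) := by push_cast; ring
  rw [hT]
  have hr : PySem.List.pyRange 0 ((Gn + 2 : Nat) : Int) 1
      = (List.range (Gn + 2)).map (fun (k : Nat) => (k : Int)) := by
    rw [PySem.List.pyRange_one, Int.sub_zero, Int.toNat_natCast]
    simp
  rw [hr, ← pv_map_slice, ← pv_map_slice, List.map_map, List.map_map]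
  apply List.map_congr_left
  intro j hj
  have hj' : j < Gn + 2 := by
    exact List.mem_range.mp (pv_mem_slice _ _ _ hj)
  simp only [Function.comp_apply]
  congr 1
  unfold pvItem
  by_cases h1 : j < Gn
  · rw [if_pos (by exact_mod_cast h1), if_pos h1]
    have e0 : ((4 * (j:Int))).toNat = 4*j := by omega
    have e1 : ((4 * (j:Int) + 1)).toNat = 4*j+1 := by omega
    have e2 : ((4 * (j:Int) + 2)).toNat = 4*j+2 := by omega
    have e3 : ((4 * (j:Int) + 3)).toNat = 4*j+3 := by omega
    rw [e0, e1, e2, e3]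
  · rw [if_neg (by exact_mod_cast h1), if_neg h1]
    by_cases h2 : j = Gn
    · rw [if_pos (by exact_mod_cast h2), if_pos h2, ← hn,
          PySem.List.slice_toNat _ (by norm_num) (by norm_num)]
      simp
    · rw [if_neg (by exact_mod_cast h2), if_neg h2, ← hn,
          PySem.List.slice_toNat _ (by norm_num) (by norm_num)]
      simp

-- ===== VERDICT (by name: the statement is the Claim_ definition above) =====
theorem PadMessage_09_spec : Claim_equal_PadMessage_09 := by
  intro s m p hdom hpre
  unfold Spec_PadMessage_09
  rw [pv_A_eq s m p hpre, pv_B_eq s m p hpre]
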